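-- pv_equiv track=rewrite | github.com/daimrod/opinion-sentence-annotator | features.py | f_elongated_words
-- ===== SOURCE A (Python) =====
-- def f_elongated_words(s):
--     """Return the number of words with one character repeated more than 2
-- times.
--
--     This function assumes that the string is tokenized and all words
--     are separated by spaces.
--
--     Args:
--         s: A string.
--
--     Returns:
--         The number of words with one character repeated more than 2 times.
--     """
--     n = 0
--     for word in s.split(' '):
--         for i in range(len(word) - 2):
--             s = word[i:3+i]
--             if len(set(s)) == 1:
--                 n = n + 1
--                 break
--     return [n]
-- ===== SOURCE B (Python) =====
-- def f_elongated_words(s):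
--     n = 0
--     for word in s.split(' '):
--         prev = None
--         run = 1
--         for ch in word:
--             run = run + 1 if ch == prev else 1
--             prev = ch
--             if run >= 3:
--                 n += 1
--                 break
--     return [n]
-- ===== Notes on version B (the rewrite author's own statement) =====
-- stated objective: simpler
-- what changed: Replaced the per-word quadratic-ish window scan (slice every 3-char window and build a set of it) by a single left-to-right pass per word that keeps a run-length counter of consecutive equal characters and stops at 3.
import Mathlib
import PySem

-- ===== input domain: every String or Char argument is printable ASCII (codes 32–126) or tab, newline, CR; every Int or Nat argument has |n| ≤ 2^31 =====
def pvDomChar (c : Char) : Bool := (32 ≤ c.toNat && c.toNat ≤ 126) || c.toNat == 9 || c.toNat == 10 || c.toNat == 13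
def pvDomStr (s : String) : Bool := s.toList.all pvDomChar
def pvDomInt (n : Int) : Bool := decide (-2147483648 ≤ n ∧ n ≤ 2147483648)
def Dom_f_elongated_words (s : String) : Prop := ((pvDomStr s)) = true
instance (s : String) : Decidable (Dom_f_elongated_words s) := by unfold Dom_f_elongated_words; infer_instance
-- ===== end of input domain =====

-- B replaces A's per-position 3-char slice-and-set window test by a single pass per word
-- keeping a run-length counter of consecutive equal characters (objective: simpler).


-- ===== PORT A =====
-- inner loop 'for i in range(len(word) - 2): s = word[i:3+i]; if len(set(s)) == 1: n += 1; break'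
def pvAInner (w : List Char) (idxs : List Int) (n : Int) : Int :=
  match idxs with
  | [] => n
  | i :: rest =>
    let t := PySem.List.slice w (some i) (some (3 + i))
    if PySem.Set.len (PySem.Set.ofList t) == 1 then n + 1
    else pvAInner w rest n

def f_elongated_words (s : String) : List Int :=
  let n : Int := (PySem.Chars.splitOn s.toList [' ']).foldl
    (fun n word => pvAInner word (PySem.List.pyRange 0 (PySem.List.len word - 2) 1) n) 0
  [n]

-- ===== PORT B =====
-- inner loop of Source B: run-length counter over the word's characters, stop at run 3
def pvBScan (w : List Char) (prev : Option Char) (run : Int) : Bool :=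
  match w with
  | [] => false
  | c :: rest =>
    let run' := if some c == prev then run + 1 else 1
    if run' ≥ 3 then true else pvBScan rest (some c) run'

def f_elongated_words_alt (s : String) : List Int :=
  [(PySem.Chars.splitOn s.toList [' ']).foldl
    (fun n word => if pvBScan word none 1 then n + 1 else n) (0 : Int)]

-- ===== PRECONDITION & SPEC =====
def Spec_f_elongated_words (s : String) (out : List Int) : Prop := out = f_elongated_words_alt s
instance (s : String) (out : List Int) : Decidable (Spec_f_elongated_words s out) := by unfold Spec_f_elongated_words; infer_instance

-- ===== CLAIM (what is proved, stated in full; the proofs are below) =====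
def Claim_equal_f_elongated_words : Prop := ∀ (s : String), Dom_f_elongated_words s → Spec_f_elongated_words s (f_elongated_words s)

-- ===== LEMMAS AND PROOFS =====

-- 'the word has three equal consecutive characters'
def pvHasTriple : List Char → Bool
  | a :: b :: c :: r => (a == b && b == c) || pvHasTriple (b :: c :: r)
  | _ => false

lemma pvBScan_char :
    ∀ (rest : List Char) (c : Char),
      (pvBScan rest (some c) 1 = pvHasTriple (c :: rest)) ∧
      (pvBScan rest (some c) 2 = ((rest.head? == some c) || pvHasTriple (c :: rest))) := by
  intro rest
  induction rest with
  | nil => intro c; simp [pvBScan, pvHasTriple]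
  | cons x r ih =>
    intro c
    constructor
    · by_cases hxc : x = c
      · subst hxc
        have h2 := (ih x).2
        cases r with
        | nil => simp [pvBScan, pvHasTriple]
        | cons y r' =>
          simp only [pvBScan, pvHasTriple] at h2 ⊢
          by_cases hyx : y = x
          · subst hyx; simp_all
          · have hcomm : (y == x) = (x == y) := by simp [eq_comm]
            simp_all
      · have h1 := (ih x).1
        cases r with
        | nil => simp [pvBScan, pvHasTriple, hxc]
        | cons y r' =>
          simp only [pvBScan, pvHasTriple] at h1 ⊢
          simp_all [Ne.symm hxc]
    · by_cases hxc : x = c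
      · subst hxc; simp [pvBScan]
      · have h1 := (ih x).1
        cases r with
        | nil => simp [pvBScan, pvHasTriple, hxc]
        | cons y r' =>
          simp only [pvBScan, pvHasTriple] at h1 ⊢
          simp only [List.head?_cons]
          rw [show (some x == some c) = false by simp [hxc],
            show (c == x) = false from beq_eq_false_iff_ne.mpr (Ne.symm hxc)]
          simpa using h1

lemma pvBScan_start (w : List Char) : pvBScan w none 1 = pvHasTriple w := by
  cases w with
  | nil => rfl
  | cons c rest =>
    simp only [pvBScan]
    simpa using (pvBScan_char rest c).1

lemma pvSetLen3 (a b c : Char) :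
    (PySem.Set.len (PySem.Set.ofList [a, b, c]) == 1) = (a == b && b == c) := by
  by_cases hab : a = b <;> by_cases hbc : b = c <;> subst_vars <;>
    (simp only [PySem.Set.ofList, PySem.Set.add, PySem.Set.contains, PySem.Set.len,
        PySem.Set.empty, List.foldl, List.elem_eq_mem, List.not_mem_nil]
     <;> split_ifs <;> simp_all)

lemma pvSlice_shift (x : Char) (w : List Char) (i : Nat) :
    PySem.List.slice (x :: w) (some ((i : Int) + 1)) (some (3 + ((i : Int) + 1)))
      = PySem.List.slice w (some (i : Int)) (some (3 + (i : Int))) := by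
  have h2 : (3 + ((i : Int) + 1)) = ((i + 4 : Nat) : Int) := by push_cast; ring
  have h3 : (3 + (i : Int)) = ((i + 3 : Nat) : Int) := by push_cast; ring
  have h1 : ((i : Int) + 1) = ((i + 1 : Nat) : Int) := by push_cast; ring
  rw [h2, h3, h1, PySem.List.slice_natCast, PySem.List.slice_natCast]
  simp only [List.drop_succ_cons]
  congr 1
  omega

lemma pvAInner_shift (x : Char) (w : List Char) :
    ∀ (d i : Nat) (n : Int),
      pvAInner (x :: w) (PySem.List.pyRange ((i : Int) + 1) ((i + d : Nat) + 1) 1) n =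
      pvAInner w (PySem.List.pyRange (i : Int) (i + d : Nat) 1) n := by
  intro d
  induction d with
  | zero =>
    intro i n
    rw [PySem.List.pyRange_one_eq_nil (by push_cast; omega),
        PySem.List.pyRange_one_eq_nil (by push_cast; omega)]
    simp [pvAInner]
  | succ d ih =>
    intro i n
    rw [PySem.List.pyRange_one_cons (by push_cast; omega),
        PySem.List.pyRange_one_cons (a := (i : Int)) (by push_cast; omega)]
    simp only [pvAInner, pvSlice_shift]
    by_cases hc : (PySem.Set.len (PySem.Set.ofList (PySem.List.slice w (some (i : Int)) (some (3 + (i : Int))))) == 1) = true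
    · rw [if_pos hc, if_pos hc]
    · rw [if_neg hc, if_neg hc]
      have h := ih (i + 1) n
      push_cast at h ⊢
      ring_nf at h ⊢
      exact h

lemma pvAInner_eq_hasTriple :
    ∀ (w : List Char) (n : Int),
      pvAInner w (PySem.List.pyRange 0 (PySem.List.len w - 2) 1) n =
      if pvHasTriple w then n + 1 else n := by
  intro w
  induction w with
  | nil => intro n; simp [pvAInner, pvHasTriple, PySem.List.len_eq, PySem.List.pyRange_one_eq_nil]
  | cons a w' ih =>
    intro n
    match w', ih with
    | [], _ => simp [pvAInner, pvHasTriple, PySem.List.len_eq, PySem.List.pyRange_one_eq_nil]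
    | [b], _ => simp [pvAInner, pvHasTriple, PySem.List.len_eq, PySem.List.pyRange_one_eq_nil]
    | b :: c :: r, ih =>
      have hlen : PySem.List.len (a :: b :: c :: r) - 2 = ((r.length + 1 : Nat) : Int) := by
        simp [PySem.List.len_eq]; push_cast; ring
      rw [hlen, PySem.List.pyRange_one_cons (by push_cast; omega)]
      simp only [pvAInner]
      have hsl : PySem.List.slice (a :: b :: c :: r) (some (0 : Int)) (some (3 + (0 : Int))) = [a, b, c] := by
        norm_num
        rw [show (3 : Int) = ((3 : Nat) : Int) from rfl, PySem.List.slice_to_natCast]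
        rfl
      rw [hsl, pvSetLen3]
      by_cases h1 : (a == b && b == c) = true
      · rw [if_pos h1]
        have : pvHasTriple (a :: b :: c :: r) = true := by simp [pvHasTriple, h1]
        rw [this]; simp
      · rw [if_neg h1]
        have hshift := pvAInner_shift a (b :: c :: r) r.length 0 n
        simp only [Nat.zero_add, Nat.cast_zero, zero_add] at hshift ⊢
        have hb : ((r.length + 1 : Nat) : Int) = (r.length : Int) + 1 := by push_cast; ring
        rw [hb, hshift]
        have hlen' : PySem.List.len (b :: c :: r) - 2 = ((r.length : Nat) : Int) := by
          simp [PySem.List.len_eq]; push_cast; ring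
        rw [← hlen', ih n]
        have : pvHasTriple (a :: b :: c :: r) = pvHasTriple (b :: c :: r) := by
          simp only [pvHasTriple, h1, Bool.false_or]
        rw [this]

-- ===== VERDICT (by name: the statement is the Claim_ definition above) =====
theorem f_elongated_words_spec : Claim_equal_f_elongated_words := by
  intro s _
  unfold Spec_f_elongated_words f_elongated_words f_elongated_words_alt
  have hf : (fun (n : Int) (word : List Char) =>
        pvAInner word (PySem.List.pyRange 0 (PySem.List.len word - 2) 1) n)
      = (fun (n : Int) (word : List Char) => if pvBScan word none 1 then n + 1 else n) := by
    funext n word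
    rw [pvAInner_eq_hasTriple, pvBScan_start]
  rw [hf]
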